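-- pv_equiv track=rewrite | github.com/sivart213/impedance_analysis | eis_analysis/z_fit/plot_control_widgets.py | make_ax_labels
-- ===== SOURCE A (Python) =====
-- def make_ax_labels(base: str, n: int, prefix: str = "") -> list[tuple[str, str]]:
--     """Generate a list of names with indices based on the base name."""
--     prefix = f"{prefix.strip()} " if prefix.strip() else ""
--
--     if n <= 1:
--         return [(base, f"{prefix}{base.upper()}")]
--
--     long = ["Top", "Bottom"] if base.lower() == "y" else ["Left", "Right"]
--     if n == 3:
--         long = [long[0], "Middle", long[1]]
--     elif n > 3:
--         long = [long[0]] + [f"Mid ({i})" for i in range(1, n - 1)] + [long[1]]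
--
--     names = [(f"{base}{i+1}", f"{prefix}{name} {base.upper()}") for i, name in enumerate(long)]
--     return names
-- ===== SOURCE B (Python) =====
-- def make_ax_labels(base: str, n: int, prefix: str = "") -> list[tuple[str, str]]:
--     """Generate a list of names with indices based on the base name."""
--     p = prefix.strip()
--     pfx = f"{p} " if p else ""
--     suf = f" {base.upper()}"
--     if n <= 1:
--         return [(base, pfx + base.upper())]
--     first, last = ("Top", "Bottom") if base.lower() == "y" else ("Left", "Right")
--     # build the output BACK-TO-FRONT: emit the last tuple first, walk the middle
--     # indices downwards, emit the first tuple last, then reverse once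
--     out = [(f"{base}{n}", pfx + last + suf)]
--     i = n - 2
--     while i >= 1:
--         word = "Middle" if n == 3 else f"Mid ({i})"
--         out.append((f"{base}{i + 1}", pfx + word + suf))
--         i -= 1
--     out.append((base + "1", pfx + first + suf))
--     out.reverse()
--     return out
-- ===== Notes on version B (the rewrite author's own statement) =====
-- stated objective: alternative
-- what changed: Replaces A's build-the-word-list-then-enumerate comprehension with a back-to-front construction: a while loop counting down from n-2 emits the tuples in reverse order (last tuple first, first tuple last) into an accumulator that is reversed once at the end.
import Mathlib
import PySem

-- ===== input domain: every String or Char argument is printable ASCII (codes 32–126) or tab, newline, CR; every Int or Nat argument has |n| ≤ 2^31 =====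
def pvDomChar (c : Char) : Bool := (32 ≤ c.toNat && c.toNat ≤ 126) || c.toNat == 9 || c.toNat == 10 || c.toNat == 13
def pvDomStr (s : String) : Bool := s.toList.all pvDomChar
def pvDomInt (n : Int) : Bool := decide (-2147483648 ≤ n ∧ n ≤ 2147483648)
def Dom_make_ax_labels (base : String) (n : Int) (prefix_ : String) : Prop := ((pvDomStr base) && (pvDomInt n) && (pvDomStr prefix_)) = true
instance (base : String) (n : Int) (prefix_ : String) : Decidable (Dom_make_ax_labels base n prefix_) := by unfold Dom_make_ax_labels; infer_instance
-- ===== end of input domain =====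

-- B builds the same labels back-to-front (a countdown loop prepending to an accumulator)
-- instead of A's word-list-then-enumerate comprehension; same values, no speed claim.

-- ===== PORT A =====
def make_ax_labels (base : String) (n : Int) (prefix_ : String) : List (String × String) :=
  let pfx := if PySem.Str.strip prefix_ ≠ "" then PySem.Str.strip prefix_ ++ " " else ""
  if n ≤ 1 then [(base, pfx ++ PySem.Str.upper base)]
  else
    let long : List String :=
      if PySem.Str.lower base = "y" then ["Top", "Bottom"] else ["Left", "Right"]
    let long : List String :=
      if n = 3 then [long[0]!, "Middle", long[1]!]
      else if n > 3 then
        [long[0]!] ++ (PySem.List.pyRange 1 (n - 1) 1).map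
          (fun i => "Mid (" ++ PySem.Int.toStr i ++ ")") ++ [long[1]!]
      else long
    (PySem.List.enumerate long 0).map
      (fun p => (base ++ PySem.Int.toStr (p.1 + 1), pfx ++ p.2 ++ " " ++ PySem.Str.upper base))

-- ===== PORT B =====
-- the while loop of Source B: i counts down from n-2 to 1, appending each middle tuple
def makeAxLoop (base pfx suf : String) (n i : Int) (acc : List (String × String)) :
    List (String × String) :=
  if h : 1 ≤ i then
    makeAxLoop base pfx suf n (i - 1)
      (acc ++ [(base ++ PySem.Int.toStr (i + 1),
        pfx ++ (if n = 3 then "Middle" else "Mid (" ++ PySem.Int.toStr i ++ ")") ++ suf)])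
  else acc
termination_by i.toNat
decreasing_by omega

def make_ax_labels_alt (base : String) (n : Int) (prefix_ : String) : List (String × String) :=
  let p := PySem.Str.strip prefix_
  let pfx := if p ≠ "" then p ++ " " else ""
  let suf := " " ++ PySem.Str.upper base
  if n ≤ 1 then [(base, pfx ++ PySem.Str.upper base)]
  else
    let fl : String × String :=
      if PySem.Str.lower base = "y" then ("Top", "Bottom") else ("Left", "Right")
    let out := [(base ++ PySem.Int.toStr n, pfx ++ fl.2 ++ suf)]
    (makeAxLoop base pfx suf n (n - 2) out ++ [(base ++ "1", pfx ++ fl.1 ++ suf)]).reverse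

-- ===== PRECONDITION & SPEC =====
def Spec_make_ax_labels (base : String) (n : Int) (prefix_ : String) (out : List (String × String)) : Prop := out = make_ax_labels_alt base n prefix_
instance (base : String) (n : Int) (prefix_ : String) (out : List (String × String)) : Decidable (Spec_make_ax_labels base n prefix_ out) := by unfold Spec_make_ax_labels; infer_instance

-- ===== CLAIM (what is proved, stated in full; the proofs are below) =====
def Claim_equal_make_ax_labels : Prop := ∀ (base : String) (n : Int) (prefix_ : String), Dom_make_ax_labels base n prefix_ → Spec_make_ax_labels base n prefix_ (make_ax_labels base n prefix_)

-- ===== LEMMAS AND PROOFS =====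

-- enumerating a list built by mapping g over pyRange a b recovers the indices themselves
theorem enumerate_map_pyRange (g : Int → String) (a b : Int) :
    PySem.List.enumerate ((PySem.List.pyRange a b 1).map g) a
      = (PySem.List.pyRange a b 1).map (fun i => (i, g i)) := by
  by_cases h : b ≤ a
  · simp [PySem.List.pyRange_one_eq_nil h, PySem.List.enumerate]
  · push_neg at h
    rw [PySem.List.pyRange_one_cons h]
    simp only [List.map_cons, PySem.List.enumerate_cons]
    rw [enumerate_map_pyRange g (a + 1) b]
termination_by (b - a).toNat
decreasing_by omega

-- B's countdown loop appends the tuples for indices i, i-1, …, 1 after acc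
theorem makeAxLoop_eq (base pfx suf : String) (n i : Int) (acc : List (String × String)) :
    makeAxLoop base pfx suf n i acc
      = acc ++ ((PySem.List.pyRange 1 (i + 1) 1).map
          (fun j => (base ++ PySem.Int.toStr (j + 1),
            pfx ++ (if n = 3 then "Middle" else "Mid (" ++ PySem.Int.toStr j ++ ")") ++ suf))).reverse := by
  by_cases h : 1 ≤ i
  · rw [makeAxLoop, dif_pos h, makeAxLoop_eq base pfx suf n (i - 1)]
    rw [PySem.List.pyRange_one_append 1 i (i + 1) h (by omega),
      PySem.List.pyRange_one_cons (by omega : i < i + 1),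
      PySem.List.pyRange_one_eq_nil (by omega : i + 1 ≤ i + 1)]
    simp
  · rw [makeAxLoop, dif_neg h, PySem.List.pyRange_one_eq_nil (by omega)]
    simp
termination_by i.toNat
decreasing_by omega

-- ===== VERDICT =====
theorem make_ax_labels_spec : Claim_equal_make_ax_labels := by
  intro base n prefix_ _
  unfold Spec_make_ax_labels make_ax_labels make_ax_labels_alt
  by_cases h1 : n ≤ 1
  · simp [h1]
  · push_neg at h1
    simp only [if_neg (by omega : ¬ n ≤ 1)]
    rw [makeAxLoop_eq]
    simp only [List.reverse_append, List.reverse_cons, List.reverse_nil, List.reverse_reverse,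
      List.nil_append, List.cons_append, List.singleton_append]
    by_cases h2 : n = 2
    · subst h2
      by_cases hy : PySem.Str.lower base = "y" <;>
        simp [hy, PySem.List.enumerate, String.append_assoc,
          show PySem.List.pyRange 1 1 1 = [] by decide,
          show PySem.Int.toStr 1 = "1" by decide]
    · by_cases h3 : n = 3
      · subst h3
        by_cases hy : PySem.Str.lower base = "y" <;>
          simp [hy, PySem.List.enumerate, String.append_assoc,
            show PySem.List.pyRange 1 2 1 = [1] by decide,
            show PySem.Int.toStr 1 = "1" by decide]
      · have h4 : 3 < n := by omega
        set fl : String × String :=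
          if PySem.Str.lower base = "y" then ("Top", "Bottom") else ("Left", "Right") with hfl
        have hlong :
            (if PySem.Str.lower base = "y" then (["Top", "Bottom"] : List String)
             else ["Left", "Right"]) = [fl.1, fl.2] := by
          rw [hfl]; by_cases hy : PySem.Str.lower base = "y" <;> simp [hy]
        set g : Int → String := fun i => "Mid (" ++ PySem.Int.toStr i ++ ")" with hg
        have eA : PySem.List.enumerate
              (fl.1 :: (List.map g (PySem.List.pyRange 1 (n - 1) 1) ++ [fl.2])) 0
            = (0, fl.1) :: ((PySem.List.pyRange 1 (n - 1) 1).map (fun i => (i, g i))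
                ++ [(n - 1, fl.2)]) := by
          simp only [PySem.List.enumerate_append, PySem.List.enumerate_cons,
            PySem.List.enumerate_nil, List.length_append, List.length_map,
            List.length_cons, List.length_nil, PySem.List.length_pyRange_one]
          have hL : (0 : Int) + 1 + ((n - 1 - 1).toNat : Int) = n - 1 := by
            push_cast; omega
          rw [hL]
          norm_num
          rw [enumerate_map_pyRange]
        simp only [if_neg h3, if_pos h4, hlong]
        simp only [List.getElem!_cons_zero, List.getElem!_cons_succ]
        rw [eA]
        simp only [List.map_cons, List.map_append, List.map_map]
        have hrw : n - 2 + 1 = n - 1 := by omega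
        rw [hrw]
        refine congrArg₂ _ ?_ (congrArg₂ _ ?_ ?_)
        · simp [String.append_assoc, show PySem.Int.toStr 1 = "1" by decide]
        · apply List.map_congr_left
          intro i hi
          simp only [Function.comp, hg, if_neg h3]
          simp [← String.append_assoc, show (")" : String) ++ " " = ") " by decide]
        · simp [String.append_assoc, show n - 1 + 1 = n by omega]
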